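-- pv_equiv track=rewrite | github.com/thanm/devel-scripts | analyze-android-loadmodule-layout.py | collect_alignment
-- ===== SOURCE A (Python) =====
-- def collect_alignment(adict, off):
--   """Collect alignment histogram."""
--   algn = 1
--   for ii in range(0, 5):
--     mask = 1 << ii
--     if off & mask:
--       break
--     algn *= 2
--   if algn in adict:
--     adict[algn] += 1
--   else:
--     adict[algn] = 1
--   return algn
-- ===== SOURCE B (Python) =====
-- def collect_alignment(adict, off):
--   """Collect alignment histogram."""
--   r = off % 32
--   algn = 32 if r == 0 else r & -r
--   adict[algn] = adict.get(algn, 0) + 1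
--   return algn
-- ===== Notes on version B (the rewrite author's own statement) =====
-- stated objective: simpler
-- what changed: Replaces the five-iteration bit-scan loop with a closed form: reduce off mod 32 (which keeps exactly the five bits the loop inspects and makes the result nonnegative) and take the lowest set bit r & -r, with 32 for r == 0; the histogram update uses dict.get instead of a membership branch.
import Mathlib
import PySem

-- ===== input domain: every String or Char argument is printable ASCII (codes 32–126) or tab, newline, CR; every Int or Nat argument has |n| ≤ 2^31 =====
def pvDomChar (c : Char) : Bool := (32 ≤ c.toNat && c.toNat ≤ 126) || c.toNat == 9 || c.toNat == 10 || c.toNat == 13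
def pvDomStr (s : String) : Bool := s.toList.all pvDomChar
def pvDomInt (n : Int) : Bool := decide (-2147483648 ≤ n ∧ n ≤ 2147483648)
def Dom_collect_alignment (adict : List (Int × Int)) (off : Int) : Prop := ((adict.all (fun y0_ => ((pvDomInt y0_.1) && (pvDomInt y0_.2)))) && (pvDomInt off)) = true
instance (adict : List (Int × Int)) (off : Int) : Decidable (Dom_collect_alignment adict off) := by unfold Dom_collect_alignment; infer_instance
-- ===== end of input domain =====

-- B replaces the five-iteration bit-scan loop with the closed form (off % 32) & -(off % 32)
-- (32 when the residue is 0); both versions mutate adict (histogram bump) — the equivalence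
-- proved here is about the RETURN value only.

-- ===== PORT A =====
-- the 'for ii in range(0, 5): … break' loop, with accumulator algn
def caLoop (off : Int) : List Int → Int → Int
  | [], algn => algn
  | ii :: rest, algn =>
    if PySem.Int.band off ((1 : Int) <<< ii.toNat) ≠ 0 then algn
    else caLoop off rest (algn * 2)

def collect_alignment (adict : List (Int × Int)) (off : Int) : Int :=
  caLoop off (PySem.List.pyRange 0 5 1) 1

-- ===== PORT B =====
def collect_alignment_alt (adict : List (Int × Int)) (off : Int) : Int :=
  let r := PySem.Int.mod off 32
  if r = 0 then 32 else PySem.Int.band r (-r)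

-- ===== PRECONDITION & SPEC =====
def Spec_collect_alignment (adict : List (Int × Int)) (off : Int) (out : Int) : Prop := out = collect_alignment_alt adict off
instance (adict : List (Int × Int)) (off : Int) (out : Int) : Decidable (Spec_collect_alignment adict off out) := by unfold Spec_collect_alignment; infer_instance

-- ===== CLAIM (what is proved, stated in full; the proofs are below) =====
def Claim_equal_collect_alignment : Prop := ∀ (adict : List (Int × Int)) (off : Int), Dom_collect_alignment adict off → Spec_collect_alignment adict off (collect_alignment adict off)

-- ===== LEMMAS AND PROOFS =====

-- A's loop as an explicit five-way branch
def chainI (t : Int) : Int :=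
  if PySem.Int.band t 1 ≠ 0 then 1
  else if PySem.Int.band t 2 ≠ 0 then 2
  else if PySem.Int.band t 4 ≠ 0 then 4
  else if PySem.Int.band t 8 ≠ 0 then 8
  else if PySem.Int.band t 16 ≠ 0 then 16
  else 32

lemma A_eq_chain (adict : List (Int × Int)) (off : Int) :
    collect_alignment adict off = chainI off := by
  have hr : PySem.List.pyRange 0 5 1 = [0, 1, 2, 3, 4] := by decide
  have e0 : (1 : Int) <<< ((0 : Int)).toNat = 1 := by decide
  have e1 : (1 : Int) <<< ((1 : Int)).toNat = 2 := by decide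
  have e2 : (1 : Int) <<< ((2 : Int)).toNat = 4 := by decide
  have e3 : (1 : Int) <<< ((3 : Int)).toNat = 8 := by decide
  have e4 : (1 : Int) <<< ((4 : Int)).toNat = 16 := by decide
  simp only [collect_alignment, hr, caLoop, e0, e1, e2, e3, e4, chainI]
  norm_num

-- complement of a 5-bit value flips its low five bits
lemma nat_compl_bit : ∀ x < 32, ∀ i < 5, Nat.testBit (31 - x) i = ! Nat.testBit x i := by decide

lemma nat_mod_bit (n i : Nat) (hi : i < 5) : Nat.testBit (n % 32) i = Nat.testBit n i := by
  have h32 : (32 : Nat) = 2 ^ 5 := rfl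
  rw [h32, Nat.testBit_mod_two_pow]
  simp [hi]

-- band with a power of two, nonnegative left argument
lemma band_pow_zero_iff (a : Int) (ha : 0 ≤ a) (i : Nat) :
    PySem.Int.band a ((2 : Int) ^ i) = 0 ↔ Nat.testBit a.toNat i = false := by
  obtain ⟨n, rfl⟩ : ∃ n : Nat, a = ↑n := ⟨a.toNat, by omega⟩
  have hp : ((2 : Int) ^ i) = (((2 ^ i : Nat) : Int)) := by push_cast; ring
  rw [hp, PySem.Int.band_natCast, Nat.and_two_pow]
  cases hb : Nat.testBit n i <;> simp [hb, Int.toNat_natCast]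

-- band with a power of two, negative left argument
lemma band_pow_zero_iff_neg (a : Int) (ha : a < 0) (i : Nat) :
    PySem.Int.band a ((2 : Int) ^ i) = 0 ↔ Nat.testBit (-a - 1).toNat i = true := by
  have h2 : (0 : Int) ≤ (2 : Int) ^ i := by positivity
  have hna : ¬ (0 : Int) ≤ a := by omega
  have ht : ((2 : Int) ^ i).toNat = 2 ^ i := by
    have : ((2 : Int) ^ i) = (((2 ^ i : Nat) : Int)) := by push_cast; ring
    omega
  rw [PySem.Int.band]
  simp only [hna, if_false, h2, if_true, ht]
  rw [Nat.and_comm, Nat.and_two_pow]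
  cases hb : Nat.testBit (-a - 1).toNat i <;> simp

-- bit i < 5 of a equals bit i of a % 32
lemma band_pow_mod (a : Int) (i : Nat) (hi : i < 5) :
    PySem.Int.band (a % 32) ((2 : Int) ^ i) = 0 ↔ PySem.Int.band a ((2 : Int) ^ i) = 0 := by
  have hm0 : (0 : Int) ≤ a % 32 := Int.emod_nonneg a (by norm_num)
  rcases le_or_gt 0 a with h | h
  · -- a = ↑n : a % 32 = ↑(n % 32)
    have hn : a % 32 = (((a.toNat % 32 : Nat) : Int)) := by omega
    rw [band_pow_zero_iff _ hm0 i, band_pow_zero_iff _ h i]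
    have : (a % 32).toNat = a.toNat % 32 := by omega
    rw [this, nat_mod_bit _ _ hi]
  · -- a = -↑m - 1 with m = (-a-1).toNat : a % 32 = 31 - m % 32
    set m : Nat := (-a - 1).toNat with hm
    have ha : a = -(m : Int) - 1 := by omega
    have hmod : (a % 32).toNat = 31 - m % 32 := by omega
    rw [band_pow_zero_iff _ hm0 i, band_pow_zero_iff_neg _ h i, hmod, ← hm,
      nat_compl_bit (m % 32) (Nat.mod_lt _ (by norm_num)) i hi, ← nat_mod_bit m i hi]
    cases Nat.testBit (m % 32) i <;> simp

lemma chain_mod (off : Int) : chainI off = chainI (off % 32) := by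
  have h0 := band_pow_mod off 0 (by norm_num)
  have h1 := band_pow_mod off 1 (by norm_num)
  have h2 := band_pow_mod off 2 (by norm_num)
  have h3 := band_pow_mod off 3 (by norm_num)
  have h4 := band_pow_mod off 4 (by norm_num)
  norm_num at h0 h1 h2 h3 h4
  simp only [chainI, ne_eq, ← h0, ← h1, ← h2, ← h3, ← h4]

-- the whole identity, checked over the 32 possible residues
lemma chain_closed : ∀ x < 32, chainI ((x : Nat) : Int) =
    (if ((x : Nat) : Int) = 0 then 32 else PySem.Int.band ((x : Nat) : Int) (-((x : Nat) : Int))) := by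
  decide

lemma mod32_eq (off : Int) : PySem.Int.mod off 32 = off % 32 := by
  simp [PySem.Int.mod, Int.fmod_eq_emod_of_nonneg]

-- ===== VERDICT (by name: the statement is the Claim_ definition above) =====
theorem collect_alignment_spec : Claim_equal_collect_alignment := by
  intro adict off _
  unfold Spec_collect_alignment collect_alignment_alt
  rw [A_eq_chain, chain_mod, mod32_eq]
  have hlo : (0 : Int) ≤ off % 32 := Int.emod_nonneg off (by norm_num)
  have hhi : off % 32 < 32 := Int.emod_lt_of_pos off (by norm_num)
  have hx : off % 32 = (((off % 32).toNat : Nat) : Int) := by omega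
  rw [hx]
  exact chain_closed (off % 32).toNat (by omega)
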